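-- pv_equiv track=rewrite | github.com/hr-kim-beginer/NND | _02_class_function/scheduling.py | find_mode_in_2d_list
-- ===== SOURCE A (Python) =====
-- from collections import Counter
--
-- def find_mode_in_2d_list(two_d_list):
--     if not two_d_list:
--         return None  # 빈 리스트인 경우 None 반환
--
--     # 리스트의 각 원소(리스트)를 튜플로 변환
--     tuple_list = [tuple(sublist) for sublist in two_d_list]
--
--     # 튜플 리스트에 대해 최빈값 찾기
--     counter = Counter(tuple_list)
--     mode_data = counter.most_common(1)  # 최빈값 찾기
--     mode = mode_data[0][0]  # 튜플 형태의 최빈값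
--     return list(mode)  # 리스트 형태로 반환
-- ===== SOURCE B (Python) =====
-- def find_mode_in_2d_list(two_d_list):
--     best = None
--     best_count = 0
--     for t in dict.fromkeys(map(tuple, two_d_list)):
--         c = two_d_list.count(list(t))
--         if c > best_count:
--             best_count = c
--             best = list(t)
--     return best
-- ===== Notes on version B (the rewrite author's own statement) =====
-- stated objective: alternative
-- what changed: Replaces Counter + most_common(1) (hash counting then a sort of the items) by a single argmax loop over the first-occurrence dedup of the list, counting each distinct sublist directly with list.count; strict-greater comparison reproduces Counter's first-occurrence tie-breaking, and the empty list falls out naturally as None.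
import Mathlib
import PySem

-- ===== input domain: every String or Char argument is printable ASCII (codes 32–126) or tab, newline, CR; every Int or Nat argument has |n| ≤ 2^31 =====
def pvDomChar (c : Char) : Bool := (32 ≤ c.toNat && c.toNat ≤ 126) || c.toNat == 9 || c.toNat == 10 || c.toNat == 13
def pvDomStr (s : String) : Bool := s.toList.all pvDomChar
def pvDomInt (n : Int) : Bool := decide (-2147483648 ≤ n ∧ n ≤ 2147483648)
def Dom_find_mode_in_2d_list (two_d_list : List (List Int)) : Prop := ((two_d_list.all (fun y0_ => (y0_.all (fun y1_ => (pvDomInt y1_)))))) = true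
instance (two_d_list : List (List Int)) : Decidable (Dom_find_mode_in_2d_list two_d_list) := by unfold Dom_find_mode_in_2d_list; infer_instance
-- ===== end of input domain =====

-- B replaces A's Counter + most_common(1) by a single argmax loop over the first-occurrence
-- dedup of the list, counting each candidate directly; same value, including first-occurrence
-- tie-breaking (objective: alternative).

-- ===== PORT A =====
def find_mode_in_2d_list (two_d_list : List (List Int)) : Option (List Int) :=
  if two_d_list = [] then none
  else
    -- tuple(sublist) is the identity under the type convention (tuples and lists are both List Int)
    let tuple_list := two_d_list.map (fun sublist => sublist)
    let counter := PySem.Dict.counter tuple_list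
    -- Counter.most_common(1): the first element of the stable descending sort of items by count,
    -- as a one-element list (heapq.nlargest(1, …) = sorted(…, reverse=True)[:1], both stable)
    let mode_data := (PySem.List.sorted counter.items (fun p => p.2) true).take 1
    match mode_data with
    | [] => none  -- unreachable (tuple_list ≠ []): mode_data[0] never raises IndexError
    | (mode, _) :: _ => some mode

-- ===== PORT B =====
def find_mode_in_2d_list_alt (two_d_list : List (List Int)) : Option (List Int) :=
  ((PySem.List.dedup two_d_list).foldl
    (fun (acc : Option (List Int) × Int) t =>
      let c : Int := (PySem.List.count two_d_list t : Int)
      if acc.2 < c then (some t, c) else acc)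
    (none, 0)).1

-- ===== PRECONDITION & SPEC =====
def Spec_find_mode_in_2d_list (two_d_list : List (List Int)) (out : Option (List Int)) : Prop := out = find_mode_in_2d_list_alt two_d_list
instance (two_d_list : List (List Int)) (out : Option (List Int)) : Decidable (Spec_find_mode_in_2d_list two_d_list out) := by unfold Spec_find_mode_in_2d_list; infer_instance

-- ===== CLAIM (what is proved, stated in full; the proofs are below) =====
def Claim_equal_find_mode_in_2d_list : Prop := ∀ (two_d_list : List (List Int)), Dom_find_mode_in_2d_list two_d_list → Spec_find_mode_in_2d_list two_d_list (find_mode_in_2d_list two_d_list)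

-- ===== LEMMAS AND PROOFS =====

-- the comparison step shared by both characterisations: keep the FIRST pair with maximal count
def pvStep (b p : List Int × Int) : List Int × Int := if b.2 < p.2 then p else b

-- head of the insertion-sort fold (reverse comparator) is the running first-strict-max
theorem pv_head_foldl_insertBy (xs : List (List Int × Int)) :
    ∀ (acc : List (List Int × Int)) (b : List Int × Int), acc.head? = some b →
    (xs.foldl (fun acc x => PySem.List.insertBy (fun a b => decide (b.2 < a.2)) x acc) acc).head?
      = some (xs.foldl pvStep b) := by
  induction xs with
  | nil => intro acc b h; simpa using h
  | cons x t ih =>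
    intro acc b h
    cases acc with
    | nil => simp at h
    | cons y ys =>
      obtain rfl : y = b := by simpa using h
      simp only [List.foldl_cons]
      by_cases hxy : y.2 < x.2
      · exact ih _ _ (by simp [PySem.List.insertBy, hxy, pvStep])
      · exact ih _ _ (by simp [PySem.List.insertBy, hxy, pvStep])

-- B's fold, once the accumulator holds a candidate, mirrors pvStep on (element, count) pairs
theorem pv_B_fold (l : List (List Int)) (ds : List (List Int)) :
    ∀ (b : List Int) (cb : Int),
    (ds.foldl
      (fun (acc : Option (List Int) × Int) t =>
        if acc.2 < (List.count t l : Int) then (some t, (List.count t l : Int)) else acc)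
      (some b, cb))
    = ((fun p : List Int × Int => (some p.1, p.2))
        ((ds.map (fun k => (k, (List.count k l : Int)))).foldl pvStep (b, cb))) := by
  induction ds with
  | nil => intro b cb; rfl
  | cons d t ih =>
    intro b cb
    simp only [List.foldl_cons, List.map_cons]
    by_cases h : cb < (List.count d l : Int)
    · simpa [h, pvStep] using ih d (List.count d l : Int)
    · simpa [h, pvStep] using ih b cb

-- PySem.Set.ofList of a nonempty list starts with its head
theorem pv_ofList_cons (x : List Int) (xs : List (List Int)) :
    ∃ rest, PySem.Set.ofList (x :: xs) = x :: rest := by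
  have aux : ∀ (l : List (List Int)) (y : List Int) (acc : List (List Int)),
      ∃ t, l.foldl PySem.Set.add (y :: acc) = y :: t := by
    intro l
    induction l with
    | nil => intro y acc; exact ⟨acc, rfl⟩
    | cons z zs ih =>
      intro y acc
      simp only [List.foldl_cons, PySem.Set.add]
      split_ifs with h
      · exact ih y acc
      · simpa [List.cons_append] using ih y (acc ++ [z])
  have h0 : PySem.Set.ofList (x :: xs) = xs.foldl PySem.Set.add [x] := by
    simp [PySem.Set.ofList, PySem.Set.empty, PySem.Set.add, PySem.Set.contains]
  rcases aux xs x [] with ⟨t, ht⟩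
  exact ⟨t, by rw [h0]; exact ht⟩

-- ===== VERDICT (by name: the statement is the Claim_ definition above) =====
theorem find_mode_in_2d_list_spec : Claim_equal_find_mode_in_2d_list := by
  intro l _
  unfold Spec_find_mode_in_2d_list
  cases l with
  | nil => rfl
  | cons x xs =>
    rcases pv_ofList_cons x xs with ⟨rest, hof⟩
    have hcpos : (0 : Int) < (List.count x (x :: xs) : Int) := by
      exact_mod_cast List.count_pos_iff.mpr List.mem_cons_self
    unfold find_mode_in_2d_list find_mode_in_2d_list_alt
    rw [PySem.List.dedup_eq_ofList, hof]
    simp only [if_neg (List.cons_ne_nil x xs), List.map_id_fun', id_eq, List.foldl_cons,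
      PySem.List.count]
    rw [if_pos hcpos, pv_B_fold (x :: xs) rest x (List.count x (x :: xs) : Int)]
    rw [PySem.Dict.items_counter, hof]
    simp only [List.map_cons]
    have hhead :
        (PySem.List.sorted
            ((x, (List.count x (x :: xs) : Int)) ::
              rest.map (fun k => (k, (List.count k (x :: xs) : Int))))
            (fun p => p.2) true).head?
          = some ((rest.map (fun k => (k, (List.count k (x :: xs) : Int)))).foldl pvStep
              (x, (List.count x (x :: xs) : Int))) := by
      rw [PySem.List.sorted_rev_eq_foldl_insertBy]
      simp only [List.foldl_cons]
      exact pv_head_foldl_insertBy _ _ _ (by simp [PySem.List.insertBy])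
    have hsne :
        (PySem.List.sorted
            ((x, (List.count x (x :: xs) : Int)) ::
              rest.map (fun k => (k, (List.count k (x :: xs) : Int))))
            (fun p => p.2) true) ≠ [] := by
      simp [PySem.List.sorted_eq_nil_iff]
    obtain ⟨m, ms, hse⟩ := List.exists_cons_of_ne_nil hsne
    rw [hse] at hhead
    simp only [List.head?_cons, Option.some.injEq] at hhead
    rw [hse]
    obtain ⟨ma, mb⟩ := m
    simp [hhead]
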